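-- pv_equiv track=rewrite | github.com/gerontech-hfut/few-shot-nested-NER | GBPE/utils/data_reader.py | nested_span_idx
-- ===== SOURCE A (Python) =====
-- def weather_nested(current_span, temp_span):
--         result= False
--         if current_span[1]>temp_span[0] and current_span[1]<=temp_span[1]:
--             if current_span[0]<=temp_span[0]:
--                 result = True
--
--         if current_span[0]>=temp_span[0] and current_span[0]<temp_span[1]:
--             if current_span[1]>=temp_span[1]:
--                 result = True
--
--         if current_span[0]>=temp_span[0] and current_span[1]<=temp_span[1]:
--             result = True
--
--         if current_span[0]<=temp_span[0] and current_span[1]>=temp_span[1]: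
--             result = True
--
--         return result
--
-- def nested_span_idx(span):
--     flat_idx, nested_idx = [], []
--     for i in range(len(span)):
--         current_span = span[i]
--         nested = False
--         for j in range(len(span)):
--             temp_span = span[j]
--             if current_span == temp_span:
--                 continue
--             if weather_nested(current_span, temp_span):
--                 nested = True
--
--         if nested:
--             nested_idx.append(i)
--         else:
--             flat_idx.append(i)
--
--     return nested_idx, flat_idx
-- ===== SOURCE B (Python) =====
-- def nested_span_idx(span):
--     def ov(c, t):
--         # symmetric overlap test: strict interval overlap, or containment either way
--         return ((c[0] < t[1] and t[0] < c[1])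
--                 or (t[0] <= c[0] and c[1] <= t[1])
--                 or (c[0] <= t[0] and t[1] <= c[1]))
--
--     # nested-ness depends only on the span's value and ov is symmetric:
--     # dedup the values, examine each unordered pair ONCE, marking both ends,
--     # and skip pairs whose both ends are already known nested.
--     vals = list(dict.fromkeys(map(tuple, span)))
--     m = len(vals)
--     nested = [False] * m
--     for i in range(m):
--         for j in range(i + 1, m):
--             if nested[i] and nested[j]:
--                 continue
--             if ov(vals[i], vals[j]):
--                 nested[i] = True
--                 nested[j] = True
--
--     flag = dict(zip(vals, nested))
--     nested_idx, flat_idx = [], []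
--     for i, s in enumerate(span):
--         (nested_idx if flag[tuple(s)] else flat_idx).append(i)
--     return nested_idx, flat_idx
-- ===== Notes on version B (the rewrite author's own statement) =====
-- stated objective: faster
-- what changed: B dedups the span values once (nested-ness depends only on the value), then runs one triangular pass over unordered pairs of distinct values, marking BOTH ends of an overlapping pair via the symmetry of the overlap test and skipping pairs already both marked, with the four-case weather_nested replaced by one closed formula; A instead runs a full n*n per-index scan.
import Mathlib
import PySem

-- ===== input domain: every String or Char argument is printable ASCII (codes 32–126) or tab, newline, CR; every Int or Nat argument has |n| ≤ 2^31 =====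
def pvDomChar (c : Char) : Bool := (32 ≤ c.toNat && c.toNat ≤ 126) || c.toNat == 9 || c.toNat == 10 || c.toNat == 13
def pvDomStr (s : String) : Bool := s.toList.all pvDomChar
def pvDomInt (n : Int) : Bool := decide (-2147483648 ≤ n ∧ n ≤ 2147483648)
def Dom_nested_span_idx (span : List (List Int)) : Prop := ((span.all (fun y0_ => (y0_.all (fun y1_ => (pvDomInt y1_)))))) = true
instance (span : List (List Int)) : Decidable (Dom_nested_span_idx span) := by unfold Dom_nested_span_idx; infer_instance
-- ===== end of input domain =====

-- B dedups the span values (nested-ness depends only on the value), then examines each unordered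
-- pair of distinct values ONCE, marking both ends of an overlapping pair (the test is symmetric),
-- instead of A's full n×n per-index scan with a four-case test.

-- ===== PORT A =====
-- indexing c[0], c[1], t[0], t[1] via pyGet?; the 'none' arms are Python's IndexError, excluded by Pre_
def weather_nested (c t : List Int) : Bool :=
  match PySem.List.pyGet? c 0, PySem.List.pyGet? c 1, PySem.List.pyGet? t 0, PySem.List.pyGet? t 1 with
  | some c0, some c1, some t0, some t1 =>
      let result := false
      let result := if c1 > t0 && c1 ≤ t1 then (if c0 ≤ t0 then true else result) else result
      let result := if c0 ≥ t0 && c0 < t1 then (if c1 ≥ t1 then true else result) else result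
      let result := if c0 ≥ t0 && c1 ≤ t1 then true else result
      let result := if c0 ≤ t0 && c1 ≥ t1 then true else result
      result
  | _, _, _, _ => false

def nested_span_idx (span : List (List Int)) : List Int × List Int :=
  (PySem.List.pyRange 0 (PySem.List.len span) 1).foldl
    (fun acc i =>
      let current_span := PySem.List.pyGetD span i []
      let nested := (PySem.List.pyRange 0 (PySem.List.len span) 1).foldl
        (fun nested j =>
          let temp_span := PySem.List.pyGetD span j []
          if current_span == temp_span then nested
          else if weather_nested current_span temp_span then true else nested)
        false
      if nested then (acc.1 ++ [i], acc.2) else (acc.1, acc.2 ++ [i]))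
    ([], [])

-- ===== PORT B =====
-- Source B's ov(c, t): strict interval overlap or containment either way (symmetric)
def ov (c t : List Int) : Bool :=
  match PySem.List.pyGet? c 0, PySem.List.pyGet? c 1, PySem.List.pyGet? t 0, PySem.List.pyGet? t 1 with
  | some a, some b, some x, some y =>
      (a < y && x < b) || (x ≤ a && b ≤ y) || (a ≤ x && y ≤ b)
  | _, _, _, _ => false

def nested_span_idx_alt (span : List (List Int)) : List Int × List Int :=
  -- vals = list(dict.fromkeys(map(tuple, span)))
  let vals := PySem.List.dedup span
  let m := PySem.List.len vals
  -- nested = [False] * m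
  let nested0 : List Bool := List.replicate m.toNat false
  -- triangular pass: skip pairs already both nested, else mark both ends of an overlapping pair
  let nestedF :=
    (PySem.List.pyRange 0 m 1).foldl (fun ns i =>
      (PySem.List.pyRange (i + 1) m 1).foldl (fun ns j =>
        if PySem.List.pyGetD ns i false && PySem.List.pyGetD ns j false then ns
        else if ov (PySem.List.pyGetD vals i []) (PySem.List.pyGetD vals j []) then
          PySem.List.pySetD (PySem.List.pySetD ns i true) j true
        else ns) ns) nested0
  -- flag = dict(zip(vals, nested))
  let flag := PySem.Dict.ofList (vals.zip nestedF)
  (PySem.List.enumerate span).foldl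
    (fun acc ic =>
      if flag.getD ic.2 false then (acc.1 ++ [ic.1], acc.2) else (acc.1, acc.2 ++ [ic.1]))
    ([], [])

-- ===== PRECONDITION & SPEC =====
-- Pre_ excludes exactly the inputs where the Pythons raise IndexError: some span shorter than 2
-- while two unequal spans exist (then the pairwise test is reached and indexes past the short span).
def Pre_nested_span_idx (span : List (List Int)) : Prop :=
  (∀ s ∈ span, 2 ≤ s.length) ∨ (∀ s ∈ span, ∀ t ∈ span, s = t)
instance (span : List (List Int)) : Decidable (Pre_nested_span_idx span) := by unfold Pre_nested_span_idx; infer_instance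
def pvWitness_nested_span_idx : List (List Int) := [[0, 3], [1, 2], [4, 5]]

def Spec_nested_span_idx (span : List (List Int)) (out : List Int × List Int) : Prop := out = nested_span_idx_alt span
instance (span : List (List Int)) (out : List Int × List Int) : Decidable (Spec_nested_span_idx span out) := by unfold Spec_nested_span_idx; infer_instance

-- ===== CLAIM (what is proved, stated in full; the proofs are below) =====
def Claim_equal_nested_span_idx : Prop := ∀ (span : List (List Int)), Dom_nested_span_idx span → Pre_nested_span_idx span → Spec_nested_span_idx span (nested_span_idx span)

-- ===== LEMMAS AND PROOFS =====

theorem weather_eq_ov (c t : List Int) : weather_nested c t = ov c t := by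
  unfold weather_nested ov
  cases PySem.List.pyGet? c 0 <;> cases PySem.List.pyGet? c 1 <;>
    cases PySem.List.pyGet? t 0 <;> cases PySem.List.pyGet? t 1 <;> simp only []
  rename_i c0 c1 t0 t1
  simp only [Bool.and_eq_true, decide_eq_true_eq, gt_iff_lt, ge_iff_le]
  split_ifs <;> simp_all <;> omega

theorem ov_symm (c t : List Int) : ov c t = ov t c := by
  unfold ov
  cases PySem.List.pyGet? c 0 <;> cases PySem.List.pyGet? c 1 <;>
    cases PySem.List.pyGet? t 0 <;> cases PySem.List.pyGet? t 1 <;> simp only []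
  rename_i c0 c1 t0 t1
  apply Bool.eq_iff_iff.mpr
  simp only [Bool.or_eq_true, Bool.and_eq_true, decide_eq_true_eq]
  tauto

def pvF (span : List (List Int)) (c : List Int) : Bool :=
  span.any (fun t => t != c && ov c t)

theorem A_inner (span : List (List Int)) (c : List Int) :
    (PySem.List.pyRange 0 (PySem.List.len span) 1).foldl
      (fun nested j =>
        let temp_span := PySem.List.pyGetD span j []
        if c == temp_span then nested
        else if weather_nested c temp_span then true else nested) false
      = pvF span c := by
  rw [PySem.List.foldl_pyRange_zero_pyGetD span []
      (fun nested t => if c == t then nested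
        else if weather_nested c t then true else nested) false]
  have hfun : (fun (nested : Bool) (t : List Int) =>
      if c == t then nested else if weather_nested c t then true else nested)
      = fun nested t => if (t != c && ov c t) then true else nested := by
    funext acc t
    by_cases h : c = t
    · subst h; simp
    · have h1 : (c == t) = false := by simp [h]
      have h2 : (t != c) = true := bne_iff_ne.mpr (Ne.symm h)
      rw [h1, h2, weather_eq_ov]
      simp
  rw [hfun, PySem.List.foldl_if_true_eq, Bool.false_or, pvF]

-- pyGetD at a nonnegative index is List.getD
theorem pyGetD_toNat {α : Type} (xs : List α) (k : Int) (d : α) (h : 0 ≤ k) :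
    PySem.List.pyGetD xs k d = xs.getD k.toNat d := by
  have hk : k = ((k.toNat : Nat) : Int) := by omega
  conv_lhs => rw [hk]
  rw [PySem.List.pyGetD_natCast]

-- in-range pySetD is List.set
theorem pySetD_eq_set {α : Type} (xs : List α) (i : Int) (v : α)
    (h0 : 0 ≤ i) (h1 : i < (xs.length : Int)) :
    PySem.List.pySetD xs i v = xs.set i.toNat v := by
  unfold PySem.List.pySetD PySem.List.pySet? PySem.List.pyIdx?
  rw [if_pos h0, if_pos h1]
  simp

theorem getD_set_true (ns : List Bool) (n k : Nat) (hn : n < ns.length) :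
    (ns.set n true).getD k false = if k = n then true else ns.getD k false := by
  by_cases hk : k = n
  · subst hk
    simp [List.getD_eq_getElem?_getD, hn]
  · simp [List.getD_eq_getElem?_getD, hk, Ne.symm hk]

-- one pair step of the triangular pass, seen through any nonnegative index k
theorem stepB_getD (vals : List (List Int)) (ns : List Bool) (i j k : Int)
    (h0i : 0 ≤ i) (h1i : i < (ns.length : Int)) (h0j : 0 ≤ j) (h1j : j < (ns.length : Int))
    (h0k : 0 ≤ k) :
    PySem.List.pyGetD
      (if PySem.List.pyGetD ns i false && PySem.List.pyGetD ns j false then ns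
       else if ov (PySem.List.pyGetD vals i []) (PySem.List.pyGetD vals j []) then
         PySem.List.pySetD (PySem.List.pySetD ns i true) j true
       else ns) k false
    = (PySem.List.pyGetD ns k false
       || (ov (PySem.List.pyGetD vals i []) (PySem.List.pyGetD vals j []) && (k == i || k == j))) := by
  rw [pyGetD_toNat ns i false h0i, pyGetD_toNat ns j false h0j]
  by_cases hg : (ns.getD i.toNat false && ns.getD j.toNat false) = true
  · rw [if_pos hg]
    rcases Bool.and_eq_true_iff.mp hg with ⟨hgi, hgj⟩
    by_cases hki : k = i
    · rw [pyGetD_toNat ns k false h0k, hki, hgi]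
      simp
    · by_cases hkj : k = j
      · rw [pyGetD_toNat ns k false h0k, hkj, hgj]
        simp
      · simp [hki, hkj]
  · rw [if_neg hg]
    by_cases hov : ov (PySem.List.pyGetD vals i []) (PySem.List.pyGetD vals j []) = true
    · rw [if_pos hov, hov]
      rw [pySetD_eq_set ns i true h0i h1i,
          pySetD_eq_set _ j true h0j (by rw [List.length_set]; exact h1j),
          pyGetD_toNat _ k false h0k, pyGetD_toNat ns k false h0k]
      rw [getD_set_true _ _ _ (by rw [List.length_set]; omega),
          getD_set_true _ _ _ (by omega)]
      by_cases hkj : k = j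
      · simp [hkj]
      · have : k.toNat ≠ j.toNat := by omega
        rw [if_neg this]
        by_cases hki : k = i
        · simp [hki]
        · have : k.toNat ≠ i.toNat := by omega
          simp [this, hki, hkj]
    · rw [if_neg hov, Bool.not_eq_true] at *
      simp [hov]

-- the inner fold over an arbitrary list of in-range indices j
theorem innerB_fold (vals : List (List Int)) (i : Int) (h0i : 0 ≤ i) (N : Nat)
    (h1i : i < (N : Int)) (L : List Int) (hL : ∀ j ∈ L, 0 ≤ j ∧ j < (N : Int)) :
    ∀ ns : List Bool, ns.length = N → ∀ k : Int, 0 ≤ k →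
    (PySem.List.pyGetD
      (L.foldl (fun ns j =>
        if PySem.List.pyGetD ns i false && PySem.List.pyGetD ns j false then ns
        else if ov (PySem.List.pyGetD vals i []) (PySem.List.pyGetD vals j []) then
          PySem.List.pySetD (PySem.List.pySetD ns i true) j true
        else ns) ns) k false
      = (PySem.List.pyGetD ns k false
         || L.any (fun j => ov (PySem.List.pyGetD vals i []) (PySem.List.pyGetD vals j []) &&
             (k == i || k == j)))
    ∧ (L.foldl (fun ns j =>
        if PySem.List.pyGetD ns i false && PySem.List.pyGetD ns j false then ns
        else if ov (PySem.List.pyGetD vals i []) (PySem.List.pyGetD vals j []) then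
          PySem.List.pySetD (PySem.List.pySetD ns i true) j true
        else ns) ns).length = N) := by
  induction L with
  | nil => intro ns hns k h0k; simp [hns]
  | cons x L ih =>
    intro ns hns k h0k
    obtain ⟨h0x, h1x⟩ := hL x (List.mem_cons_self)
    have hstep_len : (if PySem.List.pyGetD ns i false && PySem.List.pyGetD ns x false then ns
        else if ov (PySem.List.pyGetD vals i []) (PySem.List.pyGetD vals x []) then
          PySem.List.pySetD (PySem.List.pySetD ns i true) x true
        else ns).length = N := by
      split_ifs <;> simp [hns]
    have ihx := ih (fun j hj => hL j (List.mem_cons_of_mem _ hj)) _ hstep_len k h0k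
    rw [List.foldl_cons]
    refine ⟨?_, ihx.2⟩
    rw [ihx.1, stepB_getD vals ns i x k h0i (by omega) h0x (by omega) h0k, List.any_cons]
    cases PySem.List.pyGetD ns k false <;>
      cases hb : (ov (PySem.List.pyGetD vals i []) (PySem.List.pyGetD vals x []) && (k == i || k == x)) <;>
      simp

-- the outer fold, accumulated as an 'any' over the outer indices
theorem outerB_fold (vals : List (List Int)) (N : Nat) (m : Int) (hm : m = (N : Int))
    (L : List Int) (hL : ∀ i ∈ L, 0 ≤ i ∧ i < (N : Int)) :
    ∀ ns : List Bool, ns.length = N → ∀ k : Int, 0 ≤ k →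
    (PySem.List.pyGetD
      (L.foldl (fun ns i =>
        (PySem.List.pyRange (i + 1) m 1).foldl (fun ns j =>
          if PySem.List.pyGetD ns i false && PySem.List.pyGetD ns j false then ns
          else if ov (PySem.List.pyGetD vals i []) (PySem.List.pyGetD vals j []) then
            PySem.List.pySetD (PySem.List.pySetD ns i true) j true
          else ns) ns) ns) k false
      = (PySem.List.pyGetD ns k false
         || L.any (fun i => (PySem.List.pyRange (i + 1) m 1).any
             (fun j => ov (PySem.List.pyGetD vals i []) (PySem.List.pyGetD vals j []) &&
               (k == i || k == j))))
    ∧ (L.foldl (fun ns i =>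
        (PySem.List.pyRange (i + 1) m 1).foldl (fun ns j =>
          if PySem.List.pyGetD ns i false && PySem.List.pyGetD ns j false then ns
          else if ov (PySem.List.pyGetD vals i []) (PySem.List.pyGetD vals j []) then
            PySem.List.pySetD (PySem.List.pySetD ns i true) j true
          else ns) ns) ns).length = N) := by
  induction L with
  | nil => intro ns hns k h0k; simp [hns]
  | cons x L ih =>
    intro ns hns k h0k
    obtain ⟨h0x, h1x⟩ := hL x (List.mem_cons_self)
    have hj : ∀ j ∈ PySem.List.pyRange (x + 1) m 1, 0 ≤ j ∧ j < (N : Int) := by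
      intro j hjmem
      have := (PySem.List.mem_pyRange_one).mp hjmem
      omega
    have hin := innerB_fold vals x h0x N (by omega) (PySem.List.pyRange (x + 1) m 1) hj ns hns k h0k
    have ihx := ih (fun i hi => hL i (List.mem_cons_of_mem _ hi)) _ hin.2 k h0k
    rw [List.foldl_cons]
    refine ⟨?_, ihx.2⟩
    rw [ihx.1, hin.1, List.any_cons]
    cases PySem.List.pyGetD ns k false <;>
      cases hb : ((PySem.List.pyRange (x + 1) m 1).any
        (fun j => ov (PySem.List.pyGetD vals x []) (PySem.List.pyGetD vals j []) &&
          (k == x || k == j))) <;> simp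

-- dict(zip(vals, bs)) looks up the flag at vals[k] (vals without duplicates)
theorem get?_update_not_mem (ps : List (List Int × Bool)) (d : PySem.Dict (List Int) Bool)
    (x : List Int) (hx : x ∉ ps.map Prod.fst) :
    (ps.foldl (fun acc p => acc.insert p.1 p.2) d).get? x = d.get? x := by
  induction ps generalizing d with
  | nil => rfl
  | cons p ps ih =>
    rw [List.foldl_cons, ih _ (by simp at hx; simp [hx.2]),
        PySem.Dict.get?_insert_of_ne _ _ (by simp at hx; exact hx.1)]

theorem getD_ofList_zip (vs : List (List Int)) (bs : List Bool) (d : PySem.Dict (List Int) Bool)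
    (hnd : vs.Nodup) (hlen : bs.length = vs.length) :
    ∀ (k : Nat) (hk : k < vs.length),
      ((vs.zip bs).foldl (fun acc p => acc.insert p.1 p.2) d).getD vs[k] false = bs.getD k false := by
  induction vs generalizing bs d with
  | nil => intro k hk; simp at hk
  | cons v vs ih =>
    intro k hk
    cases bs with
    | nil => simp at hlen
    | cons b bs =>
      rw [List.zip_cons_cons, List.foldl_cons]
      cases k with
      | zero =>
        have hblen : vs.length ≤ bs.length := by simp at hlen; omega
        have hnotin : v ∉ (vs.zip bs).map Prod.fst := by
          rw [List.map_fst_zip hblen]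
          exact (List.nodup_cons.mp hnd).1
        simp only [List.getElem_cons_zero, List.getD_cons_zero]
        rw [PySem.Dict.getD_eq_get?_getD, get?_update_not_mem _ _ _ hnotin,
            PySem.Dict.get?_insert_self]
        rfl
      | succ k =>
        simp only [List.getElem_cons_succ, List.getD_cons_succ]
        exact ih bs _ (List.nodup_cons.mp hnd).2 (by simpa using hlen) k (by simpa using hk)

-- the whole mark phase + final dict, characterised: a value's flag is 'some other distinct value overlaps it'
theorem flags_characterization (span : List (List Int)) (v : List Int) (hv : v ∈ span) :
    (PySem.Dict.ofList ((PySem.List.dedup span).zip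
        ((PySem.List.pyRange 0 (PySem.List.len (PySem.List.dedup span)) 1).foldl (fun ns i =>
          (PySem.List.pyRange (i + 1) (PySem.List.len (PySem.List.dedup span)) 1).foldl (fun ns j =>
            if PySem.List.pyGetD ns i false && PySem.List.pyGetD ns j false then ns
            else if ov (PySem.List.pyGetD (PySem.List.dedup span) i [])
                (PySem.List.pyGetD (PySem.List.dedup span) j []) then
              PySem.List.pySetD (PySem.List.pySetD ns i true) j true
            else ns) ns)
          (List.replicate (PySem.List.len (PySem.List.dedup span)).toNat false)))).getD v false
      = pvF span v := by
  set vals := PySem.List.dedup span with hvals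
  have hnd : vals.Nodup := PySem.List.nodup_dedup span
  have hvmem : v ∈ vals := (PySem.List.mem_dedup _ _).mpr hv
  have hmlen : PySem.List.len vals = (vals.length : Int) := PySem.List.len_eq vals
  obtain ⟨k, hk, hkv⟩ := List.mem_iff_getElem.mp hvmem
  have hrep : (List.replicate (PySem.List.len vals).toNat false).length = vals.length := by
    rw [List.length_replicate, hmlen]; omega
  have hout := outerB_fold vals vals.length (PySem.List.len vals) hmlen
      (PySem.List.pyRange 0 (PySem.List.len vals) 1)
      (by intro i hi; have := (PySem.List.mem_pyRange_one).mp hi; omega)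
      (List.replicate (PySem.List.len vals).toNat false) hrep (k : Int) (by omega)
  have h1 := hout.1
  rw [PySem.List.pyGetD_natCast, PySem.List.pyGetD_natCast] at h1
  have hrep0 : (List.replicate (PySem.List.len vals).toNat false).getD k false = false := by
    simp [List.getD_eq_getElem?_getD, List.getElem?_replicate]
    split_ifs
    rfl
  rw [PySem.Dict.ofList, PySem.Dict.update, ← hkv,
      getD_ofList_zip vals _ PySem.Dict.empty hnd hout.2 k hk, h1, hrep0, Bool.false_or]
  -- both sides as existential statements
  rw [Bool.eq_iff_iff]
  simp only [List.any_eq_true, PySem.List.mem_pyRange_one, Bool.and_eq_true, Bool.or_eq_true,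
    beq_iff_eq, bne_iff_ne, ne_eq, pvF]
  constructor
  · rintro ⟨i, ⟨hi0, him⟩, j, ⟨hji, hjm⟩, hov, hvij⟩
    rw [hmlen] at him hjm
    have hij : i.toNat < j.toNat := by omega
    have hiN : i.toNat < vals.length := by omega
    have hjN : j.toNat < vals.length := by omega
    have hgi : PySem.List.pyGetD vals i [] = vals[i.toNat] := by
      rw [PySem.List.pyGetD_eq_getElem vals [] (by omega) (by omega)]
    have hgj : PySem.List.pyGetD vals j [] = vals[j.toNat] := by
      rw [PySem.List.pyGetD_eq_getElem vals [] (by omega) (by omega)]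
    have hne : vals[i.toNat] ≠ vals[j.toNat] := by
      intro heq
      exact absurd (hnd.getElem_inj_iff.mp heq) (by omega)
    rw [hgi, hgj] at hov
    rcases hvij with hvi | hvj
    · have hki : k = i.toNat := by omega
      refine ⟨vals[j.toNat], (PySem.List.mem_dedup _ _).mp (List.getElem_mem hjN), ?_, ?_⟩
      · simp only [hki]; exact fun h => hne h.symm
      · simp only [hki]; exact hov
    · have hkj : k = j.toNat := by omega
      refine ⟨vals[i.toNat], (PySem.List.mem_dedup _ _).mp (List.getElem_mem hiN), ?_, ?_⟩
      · simp only [hkj]; exact fun h => hne h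
      · simp only [hkj]; rw [ov_symm]; exact hov
  · rintro ⟨t, ht, htv, hov⟩
    have htvals : t ∈ vals := (PySem.List.mem_dedup _ _).mpr ht
    obtain ⟨l, hl, hlt⟩ := List.mem_iff_getElem.mp htvals
    have hkl : k ≠ l := by rintro rfl; exact htv hlt.symm
    have ek : PySem.List.pyGetD vals (k : Int) [] = vals[k] := by
      rw [PySem.List.pyGetD_eq_getElem vals [] (by omega) (by exact_mod_cast hk)]
      simp
    have el : PySem.List.pyGetD vals (l : Int) [] = t := by
      rw [PySem.List.pyGetD_eq_getElem vals [] (by omega) (by exact_mod_cast hl)]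
      simpa using hlt
    rcases Nat.lt_or_ge k l with hlt' | hge
    · exact ⟨(k : Int), ⟨by omega, by rw [hmlen]; exact_mod_cast hk⟩, (l : Int),
        ⟨by omega, by rw [hmlen]; exact_mod_cast hl⟩,
        by rw [ek, el]; exact hov, Or.inl (by omega)⟩
    · have hlk : l < k := by omega
      exact ⟨(l : Int), ⟨by omega, by rw [hmlen]; exact_mod_cast hl⟩, (k : Int),
        ⟨by omega, by rw [hmlen]; exact_mod_cast hk⟩,
        by rw [ek, el, ov_symm]; exact hov, Or.inr (by omega)⟩

-- ===== VERDICT (by name: the statement is the Claim_ definition above) =====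
theorem nested_span_idx_spec : Claim_equal_nested_span_idx := by
  intro span _ _
  unfold Spec_nested_span_idx nested_span_idx nested_span_idx_alt
  simp only [A_inner]
  rw [show PySem.List.enumerate span
      = (PySem.List.pyRange 0 (PySem.List.len span) 1).map
          (fun j => (j, PySem.List.pyGetD span j []))
    from PySem.List.enumerate_eq_map_pyRange span []]
  rw [List.foldl_map]
  apply PySem.List.foldl_congr_mem
  intro acc i hi
  have hmem := (PySem.List.mem_pyRange_one).mp (by simpa [PySem.List.len_eq] using hi)
  have hget : PySem.List.pyGetD span i [] ∈ span := by
    rw [PySem.List.pyGetD_eq_getElem]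
    · exact List.getElem_mem _
    · omega
    · simpa [PySem.List.len_eq] using hmem.2
  rw [flags_characterization span _ hget]
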